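-- pv_equiv track=rewrite | github.com/minminlittleshrimp/helix | rll_constraint.py | _unescape_pointer_pattern
-- ===== SOURCE A (Python) =====
-- from typing import List
--
-- def _unescape_pointer_pattern(sequence: List[int]) -> List[int]:
--     """
--     Un-escape [3,1,2] patterns back to [3,2].
--
--     Args:
--         sequence: Quaternary sequence with escaped patterns
--
--     Returns:
--         Sequence with [3,1,2] patterns un-escaped to [3,2]
--     """
--     result = []
--     i = 0
--     while i < len(sequence):
--         if (i < len(sequence) - 2 and
--             sequence[i] == 3 and sequence[i+1] == 1 and sequence[i+2] == 2):
--             # Found escaped pattern [3,1,2], restore to [3,2]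
--             result.extend([3, 2])
--             i += 3
--         else:
--             result.append(sequence[i])
--             i += 1
--     return result
-- ===== SOURCE B (Python) =====
-- def _unescape_pointer_pattern(sequence):
--     """Un-escape [3,1,2] patterns back to [3,2] (stack with look-behind collapse)."""
--     result = []
--     for x in sequence:
--         result.append(x)
--         if len(result) >= 3 and result[-3:] == [3, 1, 2]:
--             result[-3:] = [3, 2]
--     return result
-- ===== Notes on version B (the rewrite author's own statement) =====
-- stated objective: simpler
-- what changed: Replaced the index-based while loop with look-ahead window and i-skipping by a single for-each pass that appends every element and collapses the last three of the result when they equal [3,1,2] (stack with look-behind).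
import Mathlib
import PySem

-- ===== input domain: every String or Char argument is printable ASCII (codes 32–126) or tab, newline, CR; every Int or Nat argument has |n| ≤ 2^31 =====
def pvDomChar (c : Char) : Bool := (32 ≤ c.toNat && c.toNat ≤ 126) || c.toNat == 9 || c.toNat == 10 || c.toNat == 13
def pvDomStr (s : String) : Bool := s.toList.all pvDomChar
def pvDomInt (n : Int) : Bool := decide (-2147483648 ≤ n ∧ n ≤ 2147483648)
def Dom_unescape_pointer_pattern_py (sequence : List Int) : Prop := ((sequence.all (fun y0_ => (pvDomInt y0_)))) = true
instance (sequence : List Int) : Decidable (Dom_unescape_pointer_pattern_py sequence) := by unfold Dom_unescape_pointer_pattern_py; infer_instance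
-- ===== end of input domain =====

-- B replaces A's index-based while loop with look-ahead window and i-skipping by a
-- single for-each pass that collapses the last three of the result (look-behind stack); simpler loop, same values.

-- ===== PORT A =====
-- A's while loop; i is a Nat (Python's i starts at 0 and only grows);
-- `i < len(sequence) - 2` over Python ints equals `i + 2 < sequence.length`;
-- both indexed accesses are guarded in range, so getD is exact here.
def aLoop (sequence result : List Int) (i : Nat) : List Int :=
  if i < sequence.length then
    if i + 2 < sequence.length ∧ sequence.getD i 0 = 3 ∧
        sequence.getD (i+1) 0 = 1 ∧ sequence.getD (i+2) 0 = 2 then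
      aLoop sequence (result ++ [3, 2]) (i + 3)
    else
      aLoop sequence (result ++ [sequence.getD i 0]) (i + 1)
  else result
termination_by sequence.length - i
decreasing_by all_goals omega

def unescape_pointer_pattern_py (sequence : List Int) : List Int :=
  aLoop sequence [] 0

-- ===== PORT B =====
-- one iteration of B's for loop: append x, then if result[-3:] == [3,1,2], replace it by [3,2]
-- (`result[-3:] == [3,1,2]` is exactly `3 ≤ len ∧ drop (len-3) = [3,1,2]`)
def bStep (result : List Int) (x : Int) : List Int :=
  let r := result ++ [x]
  if 3 ≤ r.length ∧ r.drop (r.length - 3) = [3, 1, 2] then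
    r.take (r.length - 3) ++ [3, 2]
  else r

def unescape_pointer_pattern_py_alt (sequence : List Int) : List Int :=
  sequence.foldl bStep []

-- ===== PRECONDITION & SPEC =====
def Spec_unescape_pointer_pattern_py (sequence : List Int) (out : List Int) : Prop := out = unescape_pointer_pattern_py_alt sequence
instance (sequence : List Int) (out : List Int) : Decidable (Spec_unescape_pointer_pattern_py sequence out) := by unfold Spec_unescape_pointer_pattern_py; infer_instance

-- ===== CLAIM (what is proved, stated in full; the proofs are below) =====
def Claim_equal_unescape_pointer_pattern_py : Prop := ∀ (sequence : List Int), Dom_unescape_pointer_pattern_py sequence → Spec_unescape_pointer_pattern_py sequence (unescape_pointer_pattern_py sequence)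

-- ===== LEMMAS AND PROOFS =====

-- reference function: greedy left-to-right collapse of [3,1,2] to [3,2]
def specG : List Int → List Int
  | a :: b :: c :: rest =>
      if a = 3 ∧ b = 1 ∧ c = 2 then 3 :: 2 :: specG rest
      else a :: specG (b :: c :: rest)
  | a :: rest => a :: specG rest
  | [] => []

lemma specG_cons_ne3 (x : Int) (l : List Int) (hx : x ≠ 3) :
    specG (x :: l) = x :: specG l := by
  match l with
  | [] => simp [specG]
  | [b] => simp [specG]
  | b :: c :: t => simp [specG, hx]

lemma specG_3_cons_ne1 (b : Int) (l : List Int) (hb : b ≠ 1) :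
    specG (3 :: b :: l) = 3 :: specG (b :: l) := by
  match l with
  | [] => simp [specG]
  | c :: t => simp [specG, hb]

lemma specG_31_cons_ne2 (c : Int) (l : List Int) (hc : c ≠ 2) :
    specG (3 :: 1 :: c :: l) = 3 :: specG (1 :: c :: l) := by
  simp [specG, hc]

lemma specG_312 (l : List Int) : specG (3 :: 1 :: 2 :: l) = 3 :: 2 :: specG l := by
  simp [specG]

lemma specG_cons_short (x : Int) (l : List Int) (h : l.length ≤ 1) :
    specG (x :: l) = x :: specG l := by
  match l with
  | [] => simp [specG]
  | [b] => simp [specG]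
  | b :: c :: t => simp at h

-- ===== A-side: aLoop produces specG of the remaining suffix =====
lemma aLoop_eq (sequence : List Int) : ∀ (result : List Int) (i : Nat),
    aLoop sequence result i = result ++ specG (sequence.drop i) := by
  intro result i
  induction result, i using aLoop.induct sequence with
  | case1 result i hi hcond ih =>
      obtain ⟨h2, ha, hb, hc⟩ := hcond
      have e0 : sequence.drop i = sequence[i] :: sequence.drop (i+1) :=
        List.drop_eq_getElem_cons (by omega)
      have e1 : sequence.drop (i+1) = sequence[i+1] :: sequence.drop (i+2) :=
        List.drop_eq_getElem_cons (by omega)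
      have e2 : sequence.drop (i+2) = sequence[i+2] :: sequence.drop (i+3) :=
        List.drop_eq_getElem_cons (by omega)
      rw [aLoop, if_pos hi, if_pos ⟨h2, ha, hb, hc⟩, ih]
      rw [List.getD_eq_getElem _ _ (by omega)] at ha hb hc
      rw [e0, e1, e2, ha, hb, hc, specG_312]
      simp
  | case2 result i hi hcond ih =>
      have e0 : sequence.drop i = sequence[i] :: sequence.drop (i+1) :=
        List.drop_eq_getElem_cons (by omega)
      rw [aLoop, if_pos hi, if_neg hcond, ih]
      rw [List.getD_eq_getElem _ _ (by omega)]
      rw [e0]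
      by_cases h2 : i + 2 < sequence.length
      · have e1 : sequence.drop (i+1) = sequence[i+1] :: sequence.drop (i+2) :=
          List.drop_eq_getElem_cons (by omega)
        have e2 : sequence.drop (i+2) = sequence[i+2] :: sequence.drop (i+3) :=
          List.drop_eq_getElem_cons (by omega)
        simp only [List.getD_eq_getElem _ _ (by omega : i < sequence.length),
          List.getD_eq_getElem _ _ (by omega : i + 1 < sequence.length),
          List.getD_eq_getElem _ _ (by omega : i + 2 < sequence.length), h2, true_and] at hcond
        by_cases ha : sequence[i] = (3 : Int)
        · by_cases hb : sequence[i+1] = (1 : Int)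
          · have hc : sequence[i+2] ≠ (2 : Int) := by tauto
            rw [e1, e2, ha, hb, specG_31_cons_ne2 _ _ hc]
            simp
          · rw [e1, ha, specG_3_cons_ne1 _ _ hb]
            simp
        · rw [specG_cons_ne3 _ _ ha]
          simp
      · rw [specG_cons_short _ _ (by simp; omega)]
        simp
  | case3 result i hi =>
      rw [aLoop, if_neg hi]
      rw [List.drop_eq_nil_of_le (by omega)]
      simp [specG]

-- ===== B-side: the foldl realizes the pattern automaton =====

-- state = length of the pending prefix of [3,1,2] still sitting on top of the stack
def pend : Nat → List Int
  | 0 => []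
  | 1 => [3]
  | _ => [3, 1]

def runB : Nat → List Int → List Int
  | s, [] => pend s
  | 0, x :: rest => if x = 3 then runB 1 rest else x :: runB 0 rest
  | 1, x :: rest =>
      if x = 1 then runB 2 rest
      else if x = 3 then 3 :: runB 1 rest
      else 3 :: x :: runB 0 rest
  | _+2, x :: rest =>
      if x = 2 then 3 :: 2 :: runB 0 rest
      else if x = 3 then 3 :: 1 :: runB 1 rest
      else 3 :: 1 :: x :: runB 0 rest

-- runB agrees with specG (all three reachable states at once)
lemma runB_specG : ∀ l : List Int,
    runB 0 l = specG l ∧ runB 1 l = specG (3 :: l) ∧ runB 2 l = specG (3 :: 1 :: l) := by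
  intro l
  induction l with
  | nil => refine ⟨by simp [runB, pend, specG], by simp [runB, pend, specG], by simp [runB, pend, specG]⟩
  | cons x rest ih =>
      obtain ⟨ih0, ih1, ih2⟩ := ih
      refine ⟨?_, ?_, ?_⟩
      · by_cases hx : x = 3
        · subst hx; rw [show runB 0 (3 :: rest) = runB 1 rest from by simp [runB], ih1]
        · rw [show runB 0 (x :: rest) = x :: runB 0 rest from by simp [runB, hx], ih0,
            specG_cons_ne3 _ _ hx]
      · by_cases hx1 : x = 1
        · subst hx1; rw [show runB 1 (1 :: rest) = runB 2 rest from by simp [runB], ih2]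
        · by_cases hx3 : x = 3
          · subst hx3
            rw [show runB 1 (3 :: rest) = 3 :: runB 1 rest from by simp [runB], ih1,
              specG_3_cons_ne1 _ _ (by decide)]
          · rw [show runB 1 (x :: rest) = 3 :: x :: runB 0 rest from by simp [runB, hx1, hx3], ih0,
              specG_3_cons_ne1 _ _ hx1, specG_cons_ne3 _ _ hx3]
      · by_cases hx2 : x = 2
        · subst hx2; rw [show runB 2 (2 :: rest) = 3 :: 2 :: runB 0 rest from by simp [runB], ih0,
            specG_312]
        · by_cases hx3 : x = 3
          · subst hx3
            rw [show runB 2 (3 :: rest) = 3 :: 1 :: runB 1 rest from by simp [runB], ih1,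
              specG_31_cons_ne2 _ _ (by decide), specG_cons_ne3 1 (3 :: rest) (by decide)]
          · rw [show runB 2 (x :: rest) = 3 :: 1 :: x :: runB 0 rest from by simp [runB, hx2, hx3], ih0,
              specG_31_cons_ne2 _ _ hx2, specG_cons_ne3 1 (x :: rest) (by decide),
              specG_cons_ne3 _ _ hx3]

-- out is "quiescent": it does not end in 3 nor in [3,1] (no partial pattern left behind)
def okOut (out : List Int) : Bool :=
  match out.reverse with
  | [] => true
  | [a] => a != 3
  | a :: b :: _ => a != 3 && !(a == 1 && b == 3)

lemma okOut_pair (u : List Int) (a b : Int) (hb : b ≠ 3) (hab : ¬(b = 1 ∧ a = 3)) :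
    okOut (u ++ [a, b]) = true := by
  simp only [okOut, List.reverse_append]
  simp [hb]
  tauto

lemma okOut_append1 (out : List Int) (x : Int) (hok : okOut out = true) (hx : x ≠ 3) :
    okOut (out ++ [x]) = true := by
  rcases h : out.reverse with _ | ⟨b, t⟩
  · simp [okOut, h, hx]
  · have hb : b ≠ 3 := by
      simp only [okOut, h] at hok
      rcases t with _ | ⟨c, t'⟩ <;> simp_all
    have : out ++ [x] = (t.reverse ++ [b]) ++ [x] := by
      have : out = out.reverse.reverse := by simp
      rw [this, h]; simp
    rw [this, show t.reverse ++ [b] ++ [x] = t.reverse ++ [b, x] by simp]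
    exact okOut_pair _ _ _ hx (by tauto)

-- bStep never collapses on a quiescent stack
lemma bStep_ok (out : List Int) (x : Int) (hok : okOut out = true) :
    bStep out x = out ++ [x] := by
  rcases h : out.reverse with _ | ⟨b, _ | ⟨a, t⟩⟩
  · have : out = [] := by simpa using congrArg List.reverse h
    subst this; simp [bStep]
  · have : out = [b] := by
      have := congrArg List.reverse h; simpa using this
    subst this; simp [bStep]
  · have hout : out = t.reverse ++ [a, b] := by
      have := congrArg List.reverse h; simpa using this
    have hb : b ≠ 3 := by
      rw [hout] at hok; simp only [okOut, List.reverse_append] at hok; simp_all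
    have hab : ¬(b = 1 ∧ a = 3) := by
      rw [hout] at hok; simp only [okOut, List.reverse_append] at hok; simp_all; tauto
    subst hout
    show bStep (t.reverse ++ [a, b]) x = _
    simp only [bStep, List.append_assoc]
    rw [show [a, b] ++ [x] = [a, b, x] from rfl]
    have hlen : (t.reverse ++ [a, b, x]).length - 3 = t.reverse.length := by simp
    rw [if_neg]
    intro ⟨_, hdrop⟩
    rw [hlen, List.drop_left] at hdrop
    simp at hdrop
    tauto

-- bStep on a stack ending in the pending [3]: always just appends (middle of last three is 3 ≠ 1)
lemma bStep_p1 (out : List Int) (x : Int) : bStep (out ++ [3]) x = out ++ [3, x] := by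
  rcases List.eq_nil_or_concat out with rfl | ⟨u, a, rfl⟩
  · simp [bStep]
  · simp only [List.concat_eq_append]
    simp only [bStep, List.append_assoc]
    rw [show ([a] ++ ([3] ++ [x]) : List Int) = [a, 3, x] from rfl]
    have hlen : (u ++ [a, 3, x]).length - 3 = u.length := by simp
    rw [if_neg]
    · simp
    intro ⟨_, hdrop⟩
    rw [hlen, List.drop_left] at hdrop
    simp at hdrop
  
-- bStep on a stack ending in the pending [3,1]: collapse exactly on x = 2
lemma bStep_p2_collapse (out : List Int) : bStep (out ++ [3, 1]) 2 = out ++ [3, 2] := by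
  simp only [bStep, List.append_assoc]
  rw [show [3, 1] ++ [2] = ([3, 1, 2] : List Int) from rfl]
  have hlen : (out ++ [3, 1, 2] : List Int).length - 3 = out.length := by simp
  have hcond : 3 ≤ (out ++ [3, 1, 2] : List Int).length ∧
      (out ++ [3, 1, 2] : List Int).drop ((out ++ [3, 1, 2] : List Int).length - 3) = [3, 1, 2] := by
    refine ⟨by simp, ?_⟩
    rw [hlen]; exact List.drop_left
  rw [if_pos hcond, hlen, List.take_left]

lemma bStep_p2_ne (out : List Int) (x : Int) (hx : x ≠ 2) :
    bStep (out ++ [3, 1]) x = out ++ [3, 1, x] := by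
  simp only [bStep, List.append_assoc]
  rw [show [3, 1] ++ [x] = [3, 1, x] from rfl]
  have hlen : (out ++ [3, 1, x] : List Int).length - 3 = out.length := by simp
  rw [if_neg]
  intro ⟨_, hdrop⟩
  rw [hlen, List.drop_left] at hdrop
  simp at hdrop
  exact hx hdrop

-- the fold from any quiescent stack (with pending 0, 1 or 2 symbols on top) runs the automaton
lemma foldl_bStep (l : List Int) : ∀ out : List Int,
    (okOut out = true → List.foldl bStep out l = out ++ runB 0 l)
    ∧ List.foldl bStep (out ++ [3]) l = out ++ runB 1 l
    ∧ List.foldl bStep (out ++ [3, 1]) l = out ++ runB 2 l := by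
  induction l with
  | nil => intro out; refine ⟨fun _ => by simp [runB, pend], by simp [runB, pend], by simp [runB, pend]⟩
  | cons x rest ih =>
      intro out
      refine ⟨?_, ?_, ?_⟩
      · intro hok
        rw [List.foldl_cons, bStep_ok out x hok]
        by_cases hx : x = 3
        · subst hx
          rw [(ih out).2.1, show runB 0 (3 :: rest) = runB 1 rest from by simp [runB]]
        · rw [(ih (out ++ [x])).1 (okOut_append1 out x hok hx),
            show runB 0 (x :: rest) = x :: runB 0 rest from by simp [runB, hx]]
          simp
      · rw [List.foldl_cons, bStep_p1]
        by_cases hx1 : x = 1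
        · subst hx1
          rw [show out ++ [3, 1] = out ++ [3, 1] from rfl, (ih out).2.2,
            show runB 1 (1 :: rest) = runB 2 rest from by simp [runB]]
        · by_cases hx3 : x = 3
          · subst hx3
            rw [show out ++ [3, 3] = (out ++ [3]) ++ [3] by simp, (ih (out ++ [3])).2.1,
              show runB 1 (3 :: rest) = 3 :: runB 1 rest from by simp [runB]]
            simp
          · rw [(ih (out ++ [3, x])).1 (by
                rw [show out ++ [3, x] = out ++ [3, x] from rfl]
                exact okOut_pair out 3 x hx3 (by tauto)),
              show runB 1 (x :: rest) = 3 :: x :: runB 0 rest from by simp [runB, hx1, hx3]]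
            simp
      · rw [List.foldl_cons]
        by_cases hx2 : x = 2
        · subst hx2
          rw [bStep_p2_collapse, (ih (out ++ [3, 2])).1 (okOut_pair out 3 2 (by decide) (by decide)),
            show runB 2 (2 :: rest) = 3 :: 2 :: runB 0 rest from by simp [runB]]
          simp
        · rw [bStep_p2_ne out x hx2]
          by_cases hx3 : x = 3
          · subst hx3
            rw [show out ++ [3, 1, 3] = (out ++ [3, 1]) ++ [3] by simp, (ih (out ++ [3, 1])).2.1,
              show runB 2 (3 :: rest) = 3 :: 1 :: runB 1 rest from by simp [runB]]
            simp
          · rw [show out ++ [3, 1, x] = (out ++ [3]) ++ [1, x] by simp,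
              (ih (out ++ [3] ++ [1, x])).1 (okOut_pair (out ++ [3]) 1 x hx3 (by tauto)),
              show runB 2 (x :: rest) = 3 :: 1 :: x :: runB 0 rest from by simp [runB, hx2, hx3]]
            simp

-- ===== VERDICT (by name: the statement is the Claim_ definition above) =====
theorem unescape_pointer_pattern_py_spec : Claim_equal_unescape_pointer_pattern_py := by
  intro sequence _
  unfold Spec_unescape_pointer_pattern_py unescape_pointer_pattern_py unescape_pointer_pattern_py_alt
  rw [aLoop_eq, ((foldl_bStep sequence) []).1 (by decide), (runB_specG sequence).1]
  simp
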